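-- pv_equiv track=rewrite | github.com/xmxiaoq/spriter2spine | src/spriter2spine.py | sort_parent
-- ===== SOURCE A (Python) =====
-- def sort_parent(parent, root_first):
--     depth = {}
--     lst = []
--     for k in list(parent.keys()):
--         lst.append(k)
--         if k in depth:
--             continue
--
--         cur_k = k
--         dep = 0
--
--         while cur_k in parent:
--             dep = dep + 1
--             cur_k = parent[cur_k]
--             if cur_k in depth:
--                 dep = depth[cur_k] + dep
--                 break
--
--         depth[k] = dep
--
--         cur_k = k
--         while dep > 0:
--             dep = dep - 1
--             cur_k = parent[cur_k]
--             if cur_k in depth: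
--                 break
--             depth[cur_k] = dep
--
--     lst.sort(key=lambda a: depth[a], reverse=not root_first)
--     return lst
-- ===== SOURCE B (Python) =====
-- def sort_parent(parent, root_first):
--     # Independent iterative upward walk per key instead of A's memo table.
--     def depth(k):
--         d = 0
--         while k in parent:
--             d += 1
--             k = parent[k]
--         return d
--
--     lst = list(parent.keys())
--     lst.sort(key=depth, reverse=not root_first)
--     return lst
-- ===== Notes on version B (the rewrite author's own statement) =====
-- stated objective: simpler
-- what changed: Drops A's two-loop memo-table construction (forward scan plus ancestor back-fill into a depth dict) and instead computes each key's depth by an independent iterative walk up the parent chain, then sorts the keys by that walk.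
import Mathlib
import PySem

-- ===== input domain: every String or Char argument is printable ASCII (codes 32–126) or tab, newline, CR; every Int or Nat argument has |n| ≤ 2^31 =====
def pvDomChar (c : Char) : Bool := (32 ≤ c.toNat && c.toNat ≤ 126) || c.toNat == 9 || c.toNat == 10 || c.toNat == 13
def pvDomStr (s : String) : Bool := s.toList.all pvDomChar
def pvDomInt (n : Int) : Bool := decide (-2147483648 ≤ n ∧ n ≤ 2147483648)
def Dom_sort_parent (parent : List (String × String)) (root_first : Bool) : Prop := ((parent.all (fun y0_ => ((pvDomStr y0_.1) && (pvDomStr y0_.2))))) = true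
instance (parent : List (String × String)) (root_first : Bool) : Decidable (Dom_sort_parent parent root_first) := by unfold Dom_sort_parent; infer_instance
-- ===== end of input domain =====

-- B is simpler: it replaces A's memo-table construction by an independent upward walk per key.
-- Both programs sort the same key list with the same stable sort and reverse flag.

-- parent[k] where k is known to be a key; the default is never reached on admitted inputs
def pvStep (d : PySem.Dict String String) (k : String) : String := d.getD k k

-- ===== PORT A =====
-- the first `while` of A: walk up until out of `parent` or a memoized node, with fuel
def pvLoop1 (d : PySem.Dict String String) : Nat → PySem.Dict String Int → String → Int → Int
  | 0, _, _, dep => dep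
  | n + 1, depth, cur, dep =>
    if d.contains cur then
      let dep' := dep + 1
      let cur' := pvStep d cur
      if depth.contains cur' then depth.getD cur' 0 + dep'
      else pvLoop1 d n depth cur' dep'
    else dep

-- the second `while` of A: back-fill depths of the ancestors (terminates on the counter)
def pvLoop2 (d : PySem.Dict String String) (depth : PySem.Dict String Int)
    (cur : String) (dep : Int) : PySem.Dict String Int :=
  if dep > 0 then
    let dep' := dep - 1
    let cur' := pvStep d cur
    if depth.contains cur' then depth
    else pvLoop2 d (depth.insert cur' dep') cur' dep'
  else depth
termination_by dep.toNat
decreasing_by omega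

-- one iteration of A's `for k in list(parent.keys())` loop; state = (depth dict, lst)
def pvBody (d : PySem.Dict String String)
    (st : PySem.Dict String Int × List String) (k : String) :
    PySem.Dict String Int × List String :=
  let lst := st.2 ++ [k]
  if st.1.contains k then (st.1, lst)
  else
    let dep := pvLoop1 d (d.size + 1) st.1 k 0
    let depth1 := st.1.insert k dep
    (pvLoop2 d depth1 k dep, lst)

def sort_parent (parent : List (String × String)) (root_first : Bool) : List String :=
  let d := PySem.Dict.ofList parent
  let st := d.keys.foldl (pvBody d) (PySem.Dict.empty, [])
  PySem.List.sorted st.2 (fun a => st.1.getD a 0) (!root_first)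

-- ===== PORT B =====
-- B's depth(k): iterative walk `while k in parent: d += 1; k = parent[k]`, with fuel
def pvDepthWalk (d : PySem.Dict String String) : Nat → String → Int
  | 0, _ => 0
  | n + 1, k => if d.contains k then 1 + pvDepthWalk d n (pvStep d k) else 0

def sort_parent_alt (parent : List (String × String)) (root_first : Bool) : List String :=
  let d := PySem.Dict.ofList parent
  PySem.List.sorted d.keys (fun a => pvDepthWalk d d.size a) (!root_first)

-- ===== PRECONDITION & SPEC =====
-- Pre_ excludes exactly the parent maps with a cyclic parent chain, on which the Python A loops
-- forever: from every key, iterating the parent map `size` times must land outside the key set.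
def Pre_sort_parent (parent : List (String × String)) (root_first : Bool) : Prop :=
  ∀ k ∈ (PySem.Dict.ofList parent).keys,
    (PySem.Dict.ofList parent).contains
      ((pvStep (PySem.Dict.ofList parent))^[(PySem.Dict.ofList parent).size] k) = false
instance (parent : List (String × String)) (root_first : Bool) : Decidable (Pre_sort_parent parent root_first) := by unfold Pre_sort_parent; infer_instance

def pvWitness_sort_parent : (List (String × String)) × Bool := ([("a", "b"), ("b", "c")], true)

def Spec_sort_parent (parent : List (String × String)) (root_first : Bool) (out : List String) : Prop := out = sort_parent_alt parent root_first
instance (parent : List (String × String)) (root_first : Bool) (out : List String) : Decidable (Spec_sort_parent parent root_first out) := by unfold Spec_sort_parent; infer_instance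

-- ===== CLAIM (what is proved, stated in full; the proofs are below) =====
def Claim_equal_sort_parent : Prop := ∀ (parent : List (String × String)) (root_first : Bool), Dom_sort_parent parent root_first → Pre_sort_parent parent root_first → Spec_sort_parent parent root_first (sort_parent parent root_first)

-- ===== LEMMAS AND PROOFS =====

-- the chain from k leaves the key set within n steps (acyclicity bound)
def pvEscapes (d : PySem.Dict String String) : Nat → String → Bool
  | 0, k => !d.contains k
  | n + 1, k => !d.contains k || pvEscapes d n (pvStep d k)

theorem pvEscapes_of_iterate (d : PySem.Dict String String) :
    ∀ (n : Nat) (k : String), d.contains ((pvStep d)^[n] k) = false → pvEscapes d n k = true := by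
  intro n
  induction n with
  | zero => intro k h; simpa [pvEscapes] using h
  | succ n ih =>
    intro k h
    by_cases hc : d.contains k
    · rw [Function.iterate_succ_apply] at h
      simp [pvEscapes, Bool.or_eq_true]
      exact Or.inr (ih (pvStep d k) h)
    · simp [pvEscapes, hc]

theorem pvEscapes_mono (d : PySem.Dict String String) :
    ∀ n m k, pvEscapes d n k = true → n ≤ m → pvEscapes d m k = true := by
  intro n
  induction n with
  | zero =>
    intro m k h _
    cases m with
    | zero => exact h
    | succ m => simp [pvEscapes] at h ⊢; exact Or.inl h
  | succ n ih =>
    intro m k h hle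
    cases m with
    | zero => omega
    | succ m =>
      simp [pvEscapes, Bool.or_eq_true] at h ⊢
      rcases h with h | h
      · exact Or.inl h
      · exact Or.inr (ih m (pvStep d k) h (by omega))


theorem pvWalk_not_contains (d : PySem.Dict String String) (n : Nat) (k : String)
    (hc : d.contains k = false) : pvDepthWalk d n k = 0 := by
  cases n <;> simp [pvDepthWalk, hc]

theorem pvDepthWalk_stable (d : PySem.Dict String String) :
    ∀ n m k, pvEscapes d n k = true → n ≤ m → pvDepthWalk d m k = pvDepthWalk d n k := by
  intro n
  induction n with
  | zero =>
    intro m k h _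
    simp [pvEscapes] at h
    rw [pvWalk_not_contains d m k h, pvWalk_not_contains d 0 k h]
  | succ n ih =>
    intro m k h hle
    cases m with
    | zero => omega
    | succ m =>
      by_cases hc : d.contains k
      · simp [pvEscapes, hc] at h
        simp [pvDepthWalk, hc]
        exact ih m (pvStep d k) h (by omega)
      · simp [pvDepthWalk, hc]


theorem pvDepthWalk_nonneg (d : PySem.Dict String String) :
    ∀ n k, 0 ≤ pvDepthWalk d n k := by
  intro n
  induction n with
  | zero => intro k; simp [pvDepthWalk]
  | succ n ih =>
    intro k
    by_cases hc : d.contains k <;> simp [pvDepthWalk, hc]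
    have := ih (pvStep d k); omega


theorem pvDepthWalk_le (d : PySem.Dict String String) :
    ∀ n k, pvDepthWalk d n k ≤ (n : Int) := by
  intro n
  induction n with
  | zero => intro k; simp [pvDepthWalk]
  | succ n ih =>
    intro k
    by_cases hc : d.contains k <;> simp [pvDepthWalk, hc]
    · have := ih (pvStep d k); omega
    · omega


theorem pvEscapes_step (d : PySem.Dict String String) (k : String)
    (hc : d.contains k = true) (he : pvEscapes d d.size k = true) :
    pvEscapes d d.size (pvStep d k) = true := by
  rcases hs : d.size with _ | n
  · rw [hs] at he; simp [pvEscapes, hc] at he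
  · rw [hs] at he
    simp [pvEscapes, hc] at he
    exact pvEscapes_mono d n (n + 1) (pvStep d k) he (by omega)


theorem pvWalk_unfold (d : PySem.Dict String String) (k : String)
    (hc : d.contains k = true) (he : pvEscapes d d.size k = true) :
    pvDepthWalk d d.size k = 1 + pvDepthWalk d d.size (pvStep d k) := by
  rcases hs : d.size with _ | n
  · rw [hs] at he; simp [pvEscapes, hc] at he
  · rw [hs] at he
    simp [pvEscapes, hc] at he
    rw [pvDepthWalk_stable d n (n + 1) (pvStep d k) he (by omega)]
    simp [pvDepthWalk, hc]



-- every entry of the memo dict is the true depth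
def pvGood (d : PySem.Dict String String) (depth : PySem.Dict String Int) : Prop :=
  ∀ k v, depth.get? k = some v → v = pvDepthWalk d d.size k

theorem pvGood_insert (d : PySem.Dict String String) (depth : PySem.Dict String Int)
    (k : String) (v : Int) (hg : pvGood d depth) (hv : v = pvDepthWalk d d.size k) :
    pvGood d (depth.insert k v) := by
  intro k' v' h
  rw [PySem.Dict.get?_insert] at h
  split at h
  · next heq => subst heq; cases h; exact hv
  · exact hg k' v' h


theorem pvGood_getD (d : PySem.Dict String String) (depth : PySem.Dict String Int)
    (k : String) (hg : pvGood d depth) (hc : depth.contains k = true) :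
    depth.getD k 0 = pvDepthWalk d d.size k := by
  rw [PySem.Dict.contains_eq_isSome_get?] at hc
  rcases ho : depth.get? k with _ | v
  · rw [ho] at hc; simp at hc
  · rw [PySem.Dict.getD_eq_get?_getD, ho]
    exact hg k v ho


theorem pvLoop1_eq (d : PySem.Dict String String) :
    ∀ (fuel : Nat) (cur : String) (dep : Int) (depth : PySem.Dict String Int),
      pvGood d depth → pvEscapes d d.size cur = true →
      (pvDepthWalk d d.size cur).toNat < fuel →
      pvLoop1 d fuel depth cur dep = dep + pvDepthWalk d d.size cur := by
  intro fuel
  induction fuel with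
  | zero => intro cur dep depth _ _ hlt; omega
  | succ f ih =>
    intro cur dep depth hg he hlt
    by_cases hc : d.contains cur
    · have hw := pvWalk_unfold d cur hc he
      have hes := pvEscapes_step d cur hc he
      have hnn := pvDepthWalk_nonneg d d.size (pvStep d cur)
      by_cases hm : depth.contains (pvStep d cur)
      · simp [pvLoop1, hc, hm]
        rw [pvGood_getD d depth (pvStep d cur) hg hm]
        omega
      · simp [pvLoop1, hc, hm]
        rw [ih (pvStep d cur) (dep + 1) depth hg hes (by omega)]
        omega
    · simp [pvLoop1, hc, pvWalk_not_contains d d.size cur (by simpa using hc)]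


theorem pvLoop2_contains (d : PySem.Dict String String) :
    ∀ (dep : Int) (cur : String) (depth : PySem.Dict String Int) (x : String),
      depth.contains x = true → (pvLoop2 d depth cur dep).contains x = true := by
  intro dep cur depth x hx
  fun_induction pvLoop2 d depth cur dep generalizing x with
  | case1 depth cur dep h1 cur' h2 => exact hx
  | case2 depth cur dep h1 dep' cur' h2 ih1 =>
    exact ih1 x (by rw [PySem.Dict.contains_insert, hx, Bool.or_true])
  | case3 depth cur dep h => exact hx


theorem pvLoop2_good (d : PySem.Dict String String) :
    ∀ (dep : Int) (cur : String) (depth : PySem.Dict String Int),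
      pvGood d depth → pvEscapes d d.size cur = true →
      dep = pvDepthWalk d d.size cur → pvGood d (pvLoop2 d depth cur dep) := by
  intro dep cur depth hg he hdep
  revert hg he hdep
  fun_induction pvLoop2 d depth cur dep with
  | case1 depth cur dep h1 cur' h2 => exact fun hg _ _ => hg
  | case2 depth cur dep h1 dep' cur' h2 ih1 =>
    intro hg he hdep
    have hc : d.contains cur = true := by
      by_contra hcc
      rw [pvWalk_not_contains d d.size cur (by simpa using hcc)] at hdep
      omega
    have hw := pvWalk_unfold d cur hc he
    have hv : dep - 1 = pvDepthWalk d d.size (pvStep d cur) := by omega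
    exact ih1 (pvGood_insert d depth (pvStep d cur) (dep - 1) hg hv)
      (pvEscapes_step d cur hc he) hv
  | case3 depth cur dep h => exact fun hg _ _ => hg


theorem pvFold_inv (d : PySem.Dict String String) :
    ∀ (ks : List String) (depth : PySem.Dict String Int) (lst : List String),
      pvGood d depth → (∀ k ∈ ks, pvEscapes d d.size k = true) →
      pvGood (d := d) (ks.foldl (pvBody d) (depth, lst)).1 ∧
      (ks.foldl (pvBody d) (depth, lst)).2 = lst ++ ks ∧
      (∀ x, depth.contains x = true ∨ x ∈ ks →
        (ks.foldl (pvBody d) (depth, lst)).1.contains x = true) := by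
  intro ks
  induction ks with
  | nil =>
    intro depth lst hg _
    refine ⟨hg, by simp, ?_⟩
    rintro x (hx | hx)
    · exact hx
    · simp at hx
  | cons k ks ih =>
    intro depth lst hg hes
    have hek : pvEscapes d d.size k = true := hes k (by simp)
    have hes' : ∀ k' ∈ ks, pvEscapes d d.size k' = true := fun k' hk' => hes k' (by simp [hk'])
    by_cases hc : depth.contains k
    · have hred : pvBody d (depth, lst) k = (depth, lst ++ [k]) := by simp [pvBody, hc]
      rw [List.foldl_cons, hred]
      obtain ⟨h1, h2, h3⟩ := ih depth (lst ++ [k]) hg hes'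
      refine ⟨h1, by simpa using h2, ?_⟩
      rintro x (hx | hx)
      · exact h3 x (Or.inl hx)
      · rcases List.mem_cons.mp hx with rfl | hx
        · exact h3 x (Or.inl hc)
        · exact h3 x (Or.inr hx)
    · have hle := pvDepthWalk_le d d.size k
      have hnn := pvDepthWalk_nonneg d d.size k
      have hdep : pvLoop1 d (d.size + 1) depth k 0 = pvDepthWalk d d.size k := by
        rw [pvLoop1_eq d (d.size + 1) k 0 depth hg hek (by omega)]
        omega
      have hred : pvBody d (depth, lst) k =
          (pvLoop2 d (depth.insert k (pvLoop1 d (d.size + 1) depth k 0)) k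
            (pvLoop1 d (d.size + 1) depth k 0), lst ++ [k]) := by
        simp [pvBody, hc]
      rw [List.foldl_cons, hred, hdep]
      have hg1 : pvGood d (depth.insert k (pvDepthWalk d d.size k)) :=
        pvGood_insert d depth k _ hg rfl
      have hg2 : pvGood d (pvLoop2 d (depth.insert k (pvDepthWalk d d.size k)) k
          (pvDepthWalk d d.size k)) :=
        pvLoop2_good d _ k _ hg1 hek rfl
      obtain ⟨h1, h2, h3⟩ := ih _ (lst ++ [k]) hg2 hes'
      refine ⟨h1, by simpa using h2, ?_⟩
      rintro x (hx | hx)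
      · refine h3 x (Or.inl ?_)
        exact pvLoop2_contains d _ k _ x (by rw [PySem.Dict.contains_insert, hx, Bool.or_true])
      · rcases List.mem_cons.mp hx with rfl | hx
        · refine h3 x (Or.inl ?_)
          exact pvLoop2_contains d _ x _ x (PySem.Dict.contains_insert_self _ _ _)
        · exact h3 x (Or.inr hx)


theorem pvInsertBy_congr {α : Type} (p q : α → α → Bool) (x : α) :
    ∀ ys : List α, (∀ y ∈ ys, p x y = q x y) →
      PySem.List.insertBy p x ys = PySem.List.insertBy q x ys := by
  intro ys
  induction ys with
  | nil => intro _; rfl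
  | cons y ys ih =>
    intro h
    simp only [PySem.List.insertBy, h y (by simp)]
    split
    · rfl
    · rw [ih (fun z hz => h z (by simp [hz]))]


theorem pvFoldl_insertBy_congr (c : Int → Int → Bool) (f g : String → Int) :
    ∀ (xs acc : List String), (∀ x ∈ xs, f x = g x) → (∀ x ∈ acc, f x = g x) →
      xs.foldl (fun acc x => PySem.List.insertBy (fun a b => c (f a) (f b)) x acc) acc =
      xs.foldl (fun acc x => PySem.List.insertBy (fun a b => c (g a) (g b)) x acc) acc := by
  intro xs
  induction xs with
  | nil => intro acc _ _; rfl
  | cons x xs ih =>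
    intro acc hxs hacc
    have hx : f x = g x := hxs x (by simp)
    rw [List.foldl_cons, List.foldl_cons,
      pvInsertBy_congr _ _ x acc (fun y hy => by rw [hx, hacc y hy])]
    exact ih _ (fun z hz => hxs z (by simp [hz]))
      (fun z hz => by
        rcases (PySem.List.mem_insertBy _ x z acc).mp hz with rfl | hz
        · exact hx
        · exact hacc z hz)


theorem pvSorted_congr (f g : String → Int) (xs : List String) (rev : Bool)
    (h : ∀ x ∈ xs, f x = g x) :
    PySem.List.sorted xs f rev = PySem.List.sorted xs g rev := by
  cases rev
  · rw [PySem.List.sorted_eq_foldl_insertBy xs f, PySem.List.sorted_eq_foldl_insertBy xs g]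
    exact pvFoldl_insertBy_congr (fun u v => decide (u < v)) f g xs [] h (by simp)
  · rw [PySem.List.sorted_rev_eq_foldl_insertBy xs f, PySem.List.sorted_rev_eq_foldl_insertBy xs g]
    exact pvFoldl_insertBy_congr (fun u v => decide (v < u)) f g xs [] h (by simp)


-- ===== VERDICT (by name: the statement is the Claim_ definition above) =====
theorem sort_parent_spec : Claim_equal_sort_parent := by
  intro parent root_first _ hpre
  show sort_parent parent root_first = sort_parent_alt parent root_first
  simp only [sort_parent, sort_parent_alt]
  have hempty : pvGood (PySem.Dict.ofList parent) PySem.Dict.empty := by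
    intro k v h
    rw [PySem.Dict.get?_empty] at h
    cases h
  obtain ⟨h1, h2, h3⟩ := pvFold_inv (PySem.Dict.ofList parent)
    (PySem.Dict.ofList parent).keys PySem.Dict.empty [] hempty
    (fun k hk => pvEscapes_of_iterate _ _ k (hpre k hk))
  rw [h2]
  simp only [List.nil_append]
  exact pvSorted_congr _ _ _ _ (fun x hx =>
    pvGood_getD (PySem.Dict.ofList parent) _ x h1 (h3 x (Or.inr hx)))
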